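-- pv_equiv track=rewrite | github.com/guogenglin/BacSpecies | BacSpecies.py | line_iterator
-- ===== SOURCE A (Python) =====
-- def line_iterator(line_breaks):
--     # Handle the BLAST output and remove the line breaks
--     line = -1
--     while True:
--         nextline = line_breaks.find('\n', line + 1)
--         if nextline < 0:
--             break
--         yield line_breaks[line + 1:nextline]
--         line = nextline
-- ===== SOURCE B (Python) =====
-- def line_iterator(line_breaks):
--     # Split once on the newline character; every segment but the unterminated last one is a line.
--     parts = line_breaks.split('\n')
--     yield from parts[:-1]
-- ===== Notes on version B (the rewrite author's own statement) =====
-- stated objective: simpler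
-- what changed: Replaces the manual position-tracking find loop with a single newline split followed by yielding all segments but the last.
import Mathlib
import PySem

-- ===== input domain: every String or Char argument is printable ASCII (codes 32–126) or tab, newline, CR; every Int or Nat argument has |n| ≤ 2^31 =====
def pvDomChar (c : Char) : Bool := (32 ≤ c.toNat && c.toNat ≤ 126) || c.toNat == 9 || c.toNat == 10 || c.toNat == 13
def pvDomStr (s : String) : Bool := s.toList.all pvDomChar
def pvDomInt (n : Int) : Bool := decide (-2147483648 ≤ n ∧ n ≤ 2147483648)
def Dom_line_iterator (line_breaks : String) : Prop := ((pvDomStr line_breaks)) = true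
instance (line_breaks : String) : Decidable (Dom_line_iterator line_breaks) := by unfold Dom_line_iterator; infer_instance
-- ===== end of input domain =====

-- B replaces A's manual position-tracking find loop by one newline split and yielding all
-- segments but the last (same O(n) cost, simpler decomposition); A is a generator, the
-- equivalence is about the list of yielded values.

-- ===== PORT A =====
-- the while-loop: state is `line` (index of the previous '\n', initially -1); each found
-- '\n' strictly advances the position, so `length + 1` iterations of fuel always suffice
def lineIterAux (line_breaks : String) : Nat → Int → List String
  | 0, _ => []
  | fuel + 1, line =>
    let nextline := PySem.Str.findFrom line_breaks "\n" (line + 1)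
    if nextline < 0 then []
    else PySem.Str.slice line_breaks (some (line + 1)) (some nextline) ::
         lineIterAux line_breaks fuel nextline

def line_iterator (line_breaks : String) : List String :=
  lineIterAux line_breaks (line_breaks.toList.length + 1) (-1)

-- ===== PORT B =====
def line_iterator_alt (line_breaks : String) : List String :=
  let parts := (PySem.Str.split? line_breaks "\n").getD []  -- split? is `some …` since "\n" ≠ ""
  PySem.List.slice parts none (some (-1))                   -- parts[:-1]

-- ===== PRECONDITION & SPEC =====
def Spec_line_iterator (line_breaks : String) (out : List String) : Prop := out = line_iterator_alt line_breaks
instance (line_breaks : String) (out : List String) : Decidable (Spec_line_iterator line_breaks out) := by unfold Spec_line_iterator; infer_instance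

-- ===== CLAIM (what is proved, stated in full; the proofs are below) =====
def Claim_equal_line_iterator : Prop := ∀ (line_breaks : String), Dom_line_iterator line_breaks → Spec_line_iterator line_breaks (line_iterator line_breaks)

-- ===== LEMMAS AND PROOFS =====

-- the common middle form: the lines before each '\n', with an accumulator for the
-- (reversed) characters of the current line
def midAcc : List Char → List Char → List (List Char)
  | _, [] => []
  | cur, c :: rest => if c = '\n' then cur.reverse :: midAcc [] rest else midAcc (c :: cur) rest

-- fuel-free form of PySem.Chars.splitOn for the separator ['\n']
def splitNL : List Char → List Char → List (List Char)
  | [], cur => [cur.reverse]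
  | c :: rest, cur => if c = '\n' then cur.reverse :: splitNL rest [] else splitNL rest (c :: cur)

theorem splitOn_go_eq (l : List Char) : ∀ (fuel : Nat) (cur : List Char) (acc : List (List Char)),
    l.length ≤ fuel →
    PySem.Chars.splitOn.go ['\n'] fuel l cur acc = acc.reverse ++ splitNL l cur := by
  induction l with
  | nil =>
    intro fuel cur acc _
    cases fuel <;> simp [PySem.Chars.splitOn.go, splitNL]
  | cons c rest ih =>
    intro fuel cur acc hf
    cases fuel with
    | zero => simp at hf
    | succ f =>
      by_cases hc : c = '\n'
      · subst hc
        have : List.isPrefixOf ['\n'] ('\n' :: rest) = true := by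
          simp [List.isPrefixOf]
        simp only [PySem.Chars.splitOn.go, this, if_pos]
        rw [show List.drop (List.length ['\n']) ('\n' :: rest) = rest from rfl]
        rw [ih f [] (cur.reverse :: acc) (by simpa using Nat.le_of_succ_le_succ hf)]
        simp [splitNL]
      · have : List.isPrefixOf ['\n'] (c :: rest) = false := by
          simp [List.isPrefixOf]
          exact fun h => absurd h.symm hc
        simp only [PySem.Chars.splitOn.go, this]
        rw [if_neg (by simp)]
        rw [ih f (c :: cur) acc (by simpa using Nat.le_of_succ_le_succ hf)]
        simp [splitNL, hc]

theorem splitOn_eq_splitNL (l : List Char) :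
    PySem.Chars.splitOn l ['\n'] = splitNL l [] := by
  rw [PySem.Chars.splitOn, splitOn_go_eq l (l.length + 1) [] [] (by omega)]
  simp

theorem splitNL_ne_nil (l : List Char) : ∀ cur, splitNL l cur ≠ [] := by
  induction l with
  | nil => intro cur; simp [splitNL]
  | cons c rest ih => intro cur; by_cases hc : c = '\n' <;> simp [splitNL, hc, ih]

theorem dropLast_splitNL (l : List Char) : ∀ cur, (splitNL l cur).dropLast = midAcc cur l := by
  induction l with
  | nil => intro cur; simp [splitNL, midAcc]
  | cons c rest ih =>
    intro cur
    by_cases hc : c = '\n'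
    · simp only [splitNL, midAcc, hc, if_pos]
      rw [List.dropLast_cons_of_ne_nil (splitNL_ne_nil rest [])]
      rw [ih]
    · simp only [splitNL, midAcc, hc, ite_false]
      exact ih (c :: cur)

theorem midAcc_eq (l : List Char) : ∀ cur, midAcc cur l =
    if '\n' ∈ l then (cur.reverse ++ l.takeWhile (· ≠ '\n')) :: midAcc [] ((l.dropWhile (· ≠ '\n')).tail)
    else [] := by
  induction l with
  | nil => intro cur; simp [midAcc]
  | cons c rest ih =>
    intro cur
    by_cases hc : c = '\n'
    · subst hc
      simp [midAcc, List.takeWhile, List.dropWhile]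
    · rw [show midAcc cur (c :: rest) = midAcc (c :: cur) rest by simp [midAcc, hc]]
      rw [ih (c :: cur)]
      have hmem : ('\n' ∈ c :: rest) = ('\n' ∈ rest) := by simp [Ne.symm hc]
      by_cases hm : '\n' ∈ rest
      · simp only [hmem, hm, if_pos, List.takeWhile, List.dropWhile]
        simp [hc]
      · simp [hmem, hm]

-- a singleton is a prefix iff the list starts with that element
theorem singleton_prefix_iff {a : Char} {l : List Char} : [a] <+: l ↔ ∃ t, l = a :: t := by
  constructor
  · rintro ⟨t, rfl⟩; exact ⟨t, rfl⟩
  · rintro ⟨t, rfl⟩; exact ⟨t, rfl⟩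

theorem singleton_infix_iff_mem {a : Char} {l : List Char} : [a] <:+: l ↔ a ∈ l := by
  constructor
  · intro h; exact List.singleton_sublist.mp h.sublist
  · intro h
    obtain ⟨s, t, rfl⟩ := List.append_of_mem h
    exact ⟨s, t, by simp⟩

-- if position n is the first occurrence of '\n', take/drop there are takeWhile/dropWhile
theorem first_occ : ∀ (n : Nat) (l : List Char),
    (∀ i < n, ¬ ['\n'] <+: l.drop i) → ['\n'] <+: l.drop n →
    l.take n = l.takeWhile (· ≠ '\n') ∧ l.drop (n + 1) = (l.dropWhile (· ≠ '\n')).tail := by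
  intro n
  induction n with
  | zero =>
    intro l _ hn
    obtain ⟨t, ht⟩ := singleton_prefix_iff.mp (by simpa using hn)
    subst ht
    simp [List.takeWhile, List.dropWhile]
  | succ m ih =>
    intro l hmin hn
    cases l with
    | nil => simp at hn
    | cons c rest =>
      have hc : c ≠ '\n' := by
        intro hc; subst hc
        exact hmin 0 (Nat.succ_pos m) ⟨rest, rfl⟩
      have h1 : ∀ i < m, ¬ ['\n'] <+: rest.drop i := by
        intro i hi
        have := hmin (i + 1) (by omega)
        simpa using this
      have h2 : ['\n'] <+: rest.drop m := by simpa using hn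
      obtain ⟨hta, hdr⟩ := ih rest h1 h2
      constructor
      · simp [List.takeWhile, hc, hta]
      · simp [List.dropWhile, hc, hdr]

-- the A-side loop, characterized: state line = k - 1 computes the lines of drop k
theorem lineIterAux_eq (s : String) : ∀ (fuel k : Nat), k ≤ s.toList.length →
    s.toList.length + 1 - k ≤ fuel →
    lineIterAux s fuel ((k : Int) - 1) = (midAcc [] (s.toList.drop k)).map String.ofList := by
  intro fuel
  induction fuel with
  | zero => intro k hk hf; omega
  | succ f ih =>
    intro k hk hf
    have hstep : ((k : Int) - 1) + 1 = (k : Int) := by ring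
    simp only [lineIterAux, hstep]
    rw [PySem.Str.findFrom_eq]
    rw [show ("\n" : String).toList = ['\n'] from rfl]
    rw [PySem.Chars.findFrom_natCast s.toList ['\n'] k hk]
    set d := s.toList.drop k with hd
    by_cases hfind : PySem.Chars.find d ['\n'] = -1
    · rw [if_pos hfind]
      rw [if_pos (by norm_num)]
      have hnm : '\n' ∉ d := fun h =>
        (PySem.Chars.find_eq_neg_one_iff d ['\n']).mp hfind (singleton_infix_iff_mem.mpr h)
      rw [midAcc_eq, if_neg hnm]
      simp
    · rw [if_neg hfind]
      have hpos : 0 ≤ PySem.Chars.find d ['\n'] := by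
        have := PySem.Chars.neg_one_le_find d ['\n']
        omega
      set m := (PySem.Chars.find d ['\n']).toNat with hm
      have hfm : PySem.Chars.find d ['\n'] = (m : Int) := by omega
      obtain ⟨hpre, hminl⟩ := PySem.Chars.find_spec hpos
      have hmlt : m < d.length := by
        obtain ⟨t, ht⟩ := singleton_prefix_iff.mp hpre
        have : (d.drop m).length ≥ 1 := by rw [ht]; simp
        simp at this; omega
      have hdlen : d.length = s.toList.length - k := by rw [hd]; simp
      rw [if_neg (by rw [hfm]; omega)]
      obtain ⟨htake, hdrop⟩ := first_occ m d hminl hpre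
      have hmem : '\n' ∈ d := by
        refine singleton_infix_iff_mem.mp ?_
        exact (PySem.Chars.find_nonneg_iff d ['\n']).mp hpos
      -- right-hand side
      rw [midAcc_eq, if_pos hmem]
      rw [List.map_cons]
      congr 1
      · -- the slice s[line+1 : nextline]
        rw [PySem.Str.slice, hfm]
        rw [show (k : Int) + (m : Int) = ((k + m : Nat) : Int) by push_cast; ring]
        rw [show ((k + m : Nat) : Int) = ((k : Int) + (m : Int)) by push_cast; ring,
            PySem.Chars.slice_eq_listSlice, PySem.List.slice_natCast_add]
        rw [← hd, htake]
        simp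
      · -- the recursive call
        have hk' : k + m + 1 ≤ s.toList.length := by omega
        have hf' : s.toList.length + 1 - (k + m + 1) ≤ f := by omega
        have := ih (k + m + 1) hk' hf'
        rw [show ((k + m + 1 : Nat) : Int) - 1 = (k : Int) + (m : Int) by push_cast; ring] at this
        rw [hfm, this, ← hdrop, hd, List.drop_drop]
        rw [show k + (m + 1) = k + m + 1 from by omega]

-- B's port, computed
theorem alt_eq (s : String) :
    line_iterator_alt s = (midAcc [] s.toList).map String.ofList := by
  unfold line_iterator_alt
  rw [PySem.Str.split?]
  rw [show ("\n" : String).toList = ['\n'] from rfl]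
  rw [PySem.Chars.split?]
  rw [if_neg (by simp)]
  simp only [Option.map_some, Option.getD_some]
  rw [PySem.List.slice_to_neg_one]
  rw [← List.map_dropLast, splitOn_eq_splitNL, dropLast_splitNL]

-- ===== VERDICT (by name: the statement is the Claim_ definition above) =====
theorem line_iterator_spec : Claim_equal_line_iterator := by
  intro s _
  unfold Spec_line_iterator
  rw [alt_eq]
  unfold line_iterator
  have := lineIterAux_eq s (s.toList.length + 1) 0 (by omega) (by omega)
  simpa using this
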